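-- pv_equiv track=rewrite | github.com/egaoneko/dsar | donghyun/algorithms/Endians.py | endianConversion
-- ===== SOURCE A (Python) =====
-- def endianConversion(number):
--     div = (24, 16, 8, 0)
--     byte = [hex(number >> i & 0xff) for i in div]
--     # 2018915346 일때0x12345678의부분 배열을 반환
--     # 00010010 00110100 01010110 01111000 (in an Blefuscu computer)
--
--     newByte = [int(byte[3 - i], 16) << div[i] for i in range(0, 4)]
--     # Big Endians => Little Endians 로 변환
--     # Little Endians의 16진수 부분 값을 10진수 정수로 변환
--
--     ret = 0
--     for x in newByte:
--         ret += x
--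
--     # 부분으로 된 값을 합쳐서 반환함
--     return ret
-- ===== SOURCE B (Python) =====
-- def endianConversion(number):
--     return int.from_bytes((number & 0xffffffff).to_bytes(4, "big"), "little")
-- ===== Notes on version B (the rewrite author's own statement) =====
-- stated objective: idiomatic
-- what changed: Replaces the per-byte hex-string round-trip (hex(), int(...,16), shifts and a summing loop) by masking to the low four bytes and re-reading the big-endian byte string little-endian with int.to_bytes/int.from_bytes.
import Mathlib
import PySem

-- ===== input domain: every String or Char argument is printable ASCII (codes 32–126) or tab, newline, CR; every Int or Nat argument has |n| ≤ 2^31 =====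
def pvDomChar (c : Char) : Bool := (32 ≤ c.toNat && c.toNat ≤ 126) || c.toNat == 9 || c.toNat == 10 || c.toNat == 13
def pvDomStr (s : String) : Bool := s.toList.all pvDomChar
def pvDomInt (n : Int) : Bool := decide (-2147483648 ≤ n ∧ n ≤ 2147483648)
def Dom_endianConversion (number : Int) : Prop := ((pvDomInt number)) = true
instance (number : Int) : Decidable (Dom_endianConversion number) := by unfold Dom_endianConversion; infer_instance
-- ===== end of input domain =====

-- B replaces A's per-byte hex/parse/shift loop by masking to the low four bytes and re-reading the
-- big-endian byte string little-endian (int.to_bytes / int.from_bytes); objective: idiomatic.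

-- ===== PORT A =====
-- hand port of Python's hex() (exact for every int; fuel = the number itself, enough since n/16 shrinks)
def pvHexDigitChar (d : Nat) : Char := "0123456789abcdef".toList.getD d '0'

def pvHexCoreFuel : Nat → Nat → List Char
  | 0, _ => []
  | _+1, 0 => []
  | f+1, n+1 => pvHexCoreFuel f ((n+1)/16) ++ [pvHexDigitChar ((n+1)%16)]

def pvHexCore (n : Nat) : List Char := pvHexCoreFuel n n

def pyHex (n : Int) : String :=
  if n = 0 then "0x0"
  else if 0 ≤ n then String.ofList ('0'::'x':: pvHexCore n.toNat)
  else String.ofList ('-'::'0'::'x':: pvHexCore (-n).toNat)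

-- int(s, 16) never fails on hex() output, so the `.getD 0` default is never taken;
-- shift amounts are the nonnegative literals 24/16/8/0, so `.toNat` is exact here
def endianConversion (number : Int) : Int :=
  let div : List Int := [24, 16, 8, 0]
  let byte : List String := div.map (fun i => pyHex (PySem.Int.band (Int.shiftRight number i.toNat) 255))
  let newByte : List Int := (PySem.List.pyRange 0 4 1).map (fun i =>
    ((PySem.Int.ofStrBase? (PySem.List.pyGetD byte (3 - i) "") 16).getD 0) <<< (PySem.List.pyGetD div i 0).toNat)
  newByte.foldl (fun ret x => ret + x) 0

-- ===== PORT B =====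
-- (number & 0xffffffff).to_bytes(4, "big") ported byte for byte (m < 2^32, so exact),
-- and int.from_bytes(·, "little") as the little-endian fold over that byte list
def endianConversion_alt (number : Int) : Int :=
  let m := PySem.Int.band number 4294967295
  let bytes : List Int := [PySem.Int.floordiv m 16777216,
    PySem.Int.mod (PySem.Int.floordiv m 65536) 256,
    PySem.Int.mod (PySem.Int.floordiv m 256) 256,
    PySem.Int.mod m 256]
  bytes.foldr (fun b acc => acc * 256 + b) 0

-- ===== PRECONDITION & SPEC =====
def Spec_endianConversion (number : Int) (out : Int) : Prop := out = endianConversion_alt number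
instance (number : Int) (out : Int) : Decidable (Spec_endianConversion number out) := by unfold Spec_endianConversion; infer_instance

-- ===== CLAIM (what is proved, stated in full; the proofs are below) =====
def Claim_equal_endianConversion : Prop := ∀ (number : Int), Dom_endianConversion number → Spec_endianConversion number (endianConversion number)

-- ===== LEMMAS AND PROOFS =====
-- Python's `x & 255` is x mod 256, on negatives too
theorem pv_band255 (a : Int) : PySem.Int.band a 255 = a % 256 := by
  have h1 : ∀ m : Nat, m &&& 255 = m % 256 := fun m => Nat.and_two_pow_sub_one_eq_mod m 8
  have h2 : ∀ m : Nat, 255 &&& m = m % 256 := fun m => by rw [Nat.and_comm]; exact h1 m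
  simp only [PySem.Int.band]
  split_ifs with h hb hc
  · rw [show ((255:Int).toNat) = 255 from rfl, h1]; omega
  · omega
  · rw [show ((255:Int).toNat) = 255 from rfl, h2]; omega
  · omega

-- Python's `x & 0xffffffff` is x mod 2^32, on negatives too
theorem pv_bandMask32 (a : Int) : PySem.Int.band a 4294967295 = a % 4294967296 := by
  have h1 : ∀ m : Nat, m &&& 4294967295 = m % 4294967296 := fun m => Nat.and_two_pow_sub_one_eq_mod m 32
  have h2 : ∀ m : Nat, 4294967295 &&& m = m % 4294967296 := fun m => by rw [Nat.and_comm]; exact h1 m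
  simp only [PySem.Int.band]
  split_ifs with h hb hc
  · rw [show ((4294967295:Int).toNat) = 4294967295 from rfl, h1]; omega
  · omega
  · rw [show ((4294967295:Int).toNat) = 4294967295 from rfl, h2]; omega
  · omega

-- int(hex(b), 16) = b for a byte value b
set_option maxRecDepth 8192 in
theorem pv_hex_roundtrip : ∀ b : Fin 256, (PySem.Int.ofStrBase? (pyHex ((b : Nat) : Int)) 16).getD 0 = ((b : Nat) : Int) := by decide

theorem pv_rt (x : Int) : (PySem.Int.ofStrBase? (pyHex (PySem.Int.band x 255)) 16).getD 0 = x % 256 := by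
  rw [pv_band255]
  have h0 : 0 ≤ x % 256 := Int.emod_nonneg x (by norm_num)
  have h1 : x % 256 < 256 := Int.emod_lt_of_pos x (by norm_num)
  have h := pv_hex_roundtrip ⟨(x % 256).toNat, by omega⟩
  simpa [Int.toNat_of_nonneg h0] using h

theorem pv_sr (m : Int) (k : Nat) : Int.shiftRight m k = m / 2^k := by
  have h := Int.shiftRight_eq_div_pow m k
  norm_num at h
  exact h

-- ===== VERDICT (by name: the statement is the Claim_ definition above) =====
theorem endianConversion_spec : Claim_equal_endianConversion := by
  intro n _
  unfold Spec_endianConversion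
  show endianConversion n = endianConversion_alt n
  simp only [endianConversion, PySem.List.pyGetD, List.map_cons,
    sup_of_le_left, max_self, List.map_nil, PySem.List.pyRange, one_ne_zero, ↓reduceIte, one_mul, zero_add, zero_lt_one,
    Nat.ofNat_pos, sub_zero, Int.reduceAdd, Int.reduceSub, EuclideanDomain.div_one, Int.reduceToNat, List.map_map]
  norm_num [List.range_succ, PySem.List.pyGet?, PySem.List.pyIdx?, List.foldl, Int.shiftLeft_eq,
    show Int.toNat 3 = 3 from rfl, show Int.toNat 2 = 2 from rfl, show Int.toNat 24 = 24 from rfl,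
    show Int.toNat 16 = 16 from rfl, show Int.toNat 8 = 8 from rfl]
  rw [pv_rt, pv_rt, pv_rt, pv_rt]
  simp only [endianConversion_alt, pv_bandMask32, List.foldr,
    PySem.Int.floordiv_eq_ediv_of_pos (a := n % 4294967296) (by norm_num : (0:Int) < 16777216),
    PySem.Int.floordiv_eq_ediv_of_pos (a := n % 4294967296) (by norm_num : (0:Int) < 65536),
    PySem.Int.floordiv_eq_ediv_of_pos (a := n % 4294967296) (by norm_num : (0:Int) < 256),
    PySem.Int.mod_eq_emod_of_pos (by norm_num : (0:Int) < 256)]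
  norm_num
  rw [pv_sr n 0, pv_sr n 8, pv_sr n 16, pv_sr n 24]
  norm_num
  omega
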